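-- pv_equiv track=rewrite | github.com/jramaswami/Advent-Of-Code-2016 | 14/A/python/one_time_pad_a.py | find_trip_and_quints
-- ===== SOURCE A (Python) =====
-- def find_trip_and_quints(key):
--     """
--     Returns the triples of a given key.
--     """
--     limit3 = len(key) - 3
--     limit5 = limit3 - 2
--     trip = ""
--     quints = {}
--     index = 0
--     while True:
--         if index > limit3:
--             return (trip, list(quints.keys()))
--         else:
--             char = key[index]
--             if char == key[index + 1] and char == key[index + 2]:
--                 if not trip:
--                     trip = char
--                 if index <= limit5 \
--                 and char == key[index + 3] \
--                 and char == key[index + 4]: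
--                     quints[char] = True
--                     index += 5
--                 else:
--                     index += 3
--             else:
--                 index += 1
-- ===== SOURCE B (Python) =====
-- def find_trip_and_quints(key):
--     """
--     Returns the triples of a given key.
--     """
--     n = len(key)
--     trip = next((key[i] for i in range(n - 2)
--                  if key[i] == key[i + 1] == key[i + 2]), "")
--     quints = list(dict.fromkeys(
--         key[i] for i in range(n - 4)
--         if key[i] == key[i + 1] == key[i + 2] == key[i + 3] == key[i + 4]))
--     return (trip, quints)
-- ===== Notes on version B (the rewrite author's own statement) =====
-- stated objective: idiomatic
-- what changed: Replaces the index-skipping while-loop state machine (advance by 1/3/5 with a trip flag and a seen-dict) by two independent single-pass comprehensions: the first triple via next() over all positions, and the quint characters via dict.fromkeys over all quint positions.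
import Mathlib
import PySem

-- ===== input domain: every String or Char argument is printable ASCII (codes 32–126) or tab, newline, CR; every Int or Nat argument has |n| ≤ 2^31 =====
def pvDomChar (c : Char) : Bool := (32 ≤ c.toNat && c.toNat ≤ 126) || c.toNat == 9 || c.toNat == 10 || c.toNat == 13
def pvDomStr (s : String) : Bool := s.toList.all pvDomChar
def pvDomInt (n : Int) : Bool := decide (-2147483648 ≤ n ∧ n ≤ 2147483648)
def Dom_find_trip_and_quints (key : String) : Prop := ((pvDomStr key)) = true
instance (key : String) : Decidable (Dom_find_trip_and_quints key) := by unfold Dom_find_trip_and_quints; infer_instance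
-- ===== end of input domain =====

-- B replaces A's index-skipping while-loop by two independent comprehension scans (idiomatic, same cost).


-- ===== PORT A =====
-- termination helper for the while-True loop, cited by name in decreasing_by
theorem find_trip_and_quints_loop_dec (limit3 : Int) (index k : Nat) (hk : 0 < k)
    (h : ¬ (index : Int) > limit3) :
    (limit3 + 3 - ((index + k : Nat) : Int)).toNat < (limit3 + 3 - (index : Int)).toNat := by
  push_cast
  omega

-- A's while-True loop: index advances by 1, 3 or 5; `trip` set on the first triple,
-- quint chars recorded (as Chars) in an insertion-ordered dict, keys returned as 1-char strings.
def find_trip_and_quints_loop (l : List Char) (limit3 limit5 : Int) (trip : String)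
    (quints : PySem.Dict Char Bool) (index : Nat) : String × List String :=
  if h : (index : Int) > limit3 then
    (trip, quints.keys.map (fun c => String.ofList [c]))
  else
    let char := l.getD index ' '
    if char == l.getD (index + 1) ' ' && char == l.getD (index + 2) ' ' then
      let trip' := if trip == "" then String.ofList [char] else trip
      if decide ((index : Int) ≤ limit5) && (char == l.getD (index + 3) ' ')
          && (char == l.getD (index + 4) ' ') then
        find_trip_and_quints_loop l limit3 limit5 trip' (quints.insert char true) (index + 5)
      else
        find_trip_and_quints_loop l limit3 limit5 trip' quints (index + 3)
    else
      find_trip_and_quints_loop l limit3 limit5 trip quints (index + 1)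
termination_by (limit3 + 3 - index).toNat
decreasing_by all_goals exact find_trip_and_quints_loop_dec limit3 index _ (by decide) h

def find_trip_and_quints (key : String) : String × List String :=
  let l := key.toList
  find_trip_and_quints_loop l ((l.length : Int) - 3) ((l.length : Int) - 3 - 2) "" PySem.Dict.empty 0

-- ===== PORT B =====
def find_trip_and_quints_alt (key : String) : String × List String :=
  let l := key.toList
  let trip :=
    match (List.range (l.length - 2)).find? (fun i =>
        l.getD i ' ' == l.getD (i + 1) ' ' && l.getD i ' ' == l.getD (i + 2) ' ') with
    | some i => String.ofList [l.getD i ' ']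
    | none => ""
  let quints := PySem.List.dedup (((List.range (l.length - 4)).filter (fun i =>
        l.getD i ' ' == l.getD (i + 1) ' ' && l.getD i ' ' == l.getD (i + 2) ' '
          && l.getD i ' ' == l.getD (i + 3) ' ' && l.getD i ' ' == l.getD (i + 4) ' ')).map
      (fun i => String.ofList [l.getD i ' ']))
  (trip, quints)

-- ===== PRECONDITION & SPEC =====
def Spec_find_trip_and_quints (key : String) (out : String × List String) : Prop := out = find_trip_and_quints_alt key
instance (key : String) (out : String × List String) : Decidable (Spec_find_trip_and_quints key out) := by unfold Spec_find_trip_and_quints; infer_instance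

-- ===== CLAIM (what is proved, stated in full; the proofs are below) =====
def Claim_equal_find_trip_and_quints : Prop := ∀ (key : String), Dom_find_trip_and_quints key → Spec_find_trip_and_quints key (find_trip_and_quints key)

-- ===== LEMMAS AND PROOFS =====

-- the two Boolean position tests of B
def tripP (l : List Char) (i : Nat) : Bool :=
  l.getD i ' ' == l.getD (i + 1) ' ' && l.getD i ' ' == l.getD (i + 2) ' '
def quintP (l : List Char) (i : Nat) : Bool :=
  l.getD i ' ' == l.getD (i + 1) ' ' && l.getD i ' ' == l.getD (i + 2) ' '
    && l.getD i ' ' == l.getD (i + 3) ' ' && l.getD i ' ' == l.getD (i + 4) ' '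

-- first triple position at or after i (B's find? restricted to a suffix of the range)
def firstTrip (l : List Char) (i : Nat) : Option Nat :=
  (List.range' i (l.length - 2 - i)).find? (tripP l)

-- fold of A's dict inserts over all quint positions at or after i
def quintFold (l : List Char) (d : PySem.Dict Char Bool) (i : Nat) : PySem.Dict Char Bool :=
  ((List.range' i (l.length - 4 - i)).filter (quintP l)).foldl
    (fun d j => d.insert (l.getD j ' ') true) d

lemma firstTrip_step (l : List Char) (i : Nat) :
    firstTrip l i = if i < l.length - 2 then
      (if tripP l i then some i else firstTrip l (i + 1)) else none := by
  unfold firstTrip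
  split
  · have h : l.length - 2 - i = (l.length - 2 - (i + 1)) + 1 := by omega
    rw [h, List.range'_succ, List.find?_cons]
    split <;> simp_all
  · have h : l.length - 2 - i = 0 := by omega
    simp [h]

lemma firstTrip_skip1 (l : List Char) (i : Nat) (ht : tripP l i = false) :
    firstTrip l i = firstTrip l (i + 1) := by
  rw [firstTrip_step]
  by_cases h2 : i < l.length - 2
  · simp [h2, ht]
  · rw [firstTrip_step]
    have : ¬ i + 1 < l.length - 2 := by omega
    simp [h2, this]

lemma firstTrip_hit (l : List Char) (i : Nat) (h2 : i < l.length - 2)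
    (ht : tripP l i = true) : firstTrip l i = some i := by
  rw [firstTrip_step]; simp [h2, ht]

lemma quintFold_step (l : List Char) (d : PySem.Dict Char Bool) (i : Nat) :
    quintFold l d i = if i < l.length - 4 then
      (if quintP l i then quintFold l (d.insert (l.getD i ' ') true) (i + 1)
       else quintFold l d (i + 1)) else d := by
  unfold quintFold
  split
  · have h : l.length - 4 - i = (l.length - 4 - (i + 1)) + 1 := by omega
    rw [h, List.range'_succ, List.filter_cons]
    split <;> simp_all
  · have h : l.length - 4 - i = 0 := by omega
    simp [h]

lemma quintFold_of_ge (l : List Char) (d : PySem.Dict Char Bool) (i : Nat)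
    (h : l.length - 4 ≤ i) : quintFold l d i = d := by
  rw [quintFold_step]; simp [Nat.not_lt.mpr h]

lemma quintFold_skip_false (l : List Char) (d : PySem.Dict Char Bool) (i : Nat)
    (hq : quintP l i = false) : quintFold l d i = quintFold l d (i + 1) := by
  rw [quintFold_step]
  by_cases h4 : i < l.length - 4
  · simp [h4, hq]
  · rw [quintFold_of_ge l d (i + 1) (by omega)]
    simp [h4]

-- inside a quint starting at i, every position i+k with k ≤ 4 carries the same char
lemma quintP_char_eq (l : List Char) (i k : Nat) (hk : k ≤ 4) (hq : quintP l i = true) :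
    l.getD (i + k) ' ' = l.getD i ' ' := by
  simp only [quintP, Bool.and_eq_true, beq_iff_eq] at hq
  obtain ⟨⟨⟨h1, h2⟩, h3⟩, h4⟩ := hq
  interval_cases k
  · simp
  · exact h1.symm
  · exact h2.symm
  · exact h3.symm
  · exact h4.symm

-- after recording the quint at i, scanning on from i+k (1 ≤ k ≤ 5) adds nothing new up to i+5
lemma quintFold_skip (l : List Char) (d : PySem.Dict Char Bool) (i : Nat)
    (hq : quintP l i = true) :
    ∀ k, 1 ≤ k → k ≤ 5 →
      quintFold l (d.insert (l.getD i ' ') true) (i + k)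
        = quintFold l (d.insert (l.getD i ' ') true) (i + 5) := by
  intro k h1 h5
  induction hn : 5 - k generalizing k with
  | zero =>
    have : k = 5 := by omega
    subst this; rfl
  | succ n ih =>
    have hk4 : k ≤ 4 := by omega
    rw [quintFold_step]
    split
    · split
      · rw [quintP_char_eq l i k hk4 hq, PySem.Dict.insert_insert_self]
        have := ih (k + 1) (by omega) (by omega) (by omega)
        simpa [Nat.add_assoc] using this
      · have := ih (k + 1) (by omega) (by omega) (by omega)
        simpa [Nat.add_assoc] using this
    · rw [quintFold_of_ge l _ (i + 5) (by omega)]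

-- a detected quint at i lets A jump from i straight to i+5
lemma quintFold_quint (l : List Char) (d : PySem.Dict Char Bool) (i : Nat)
    (hqP : quintP l i = true) (hn4 : i < l.length - 4) :
    quintFold l d i = quintFold l (d.insert (l.getD i ' ') true) (i + 5) := by
  rw [quintFold_step]
  simp only [hn4, if_true, hqP, if_true]
  exact quintFold_skip l d i hqP 1 (le_refl 1) (by omega)

-- A's quint condition at i equals quintP (given the triple)
lemma quintP_of_conds (l : List Char) (i : Nat)
    (h12 : (l.getD i ' ' == l.getD (i + 1) ' ' && l.getD i ' ' == l.getD (i + 2) ' ') = true)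
    (h34 : (l.getD i ' ' == l.getD (i + 3) ' ') = true)
    (h45 : (l.getD i ' ' == l.getD (i + 4) ' ') = true) : quintP l i = true := by
  simp_all [quintP]

-- no quint can start at i, i+1 or i+2 when the triple at i fails A's quint test
lemma no_quint_in_trip_skip (l : List Char) (i : Nat)
    (h12 : (l.getD i ' ' == l.getD (i + 1) ' ' && l.getD i ' ' == l.getD (i + 2) ' ') = true)
    (hfail : ¬ ((decide ((i : Int) ≤ (l.length : Int) - 3 - 2) && (l.getD i ' ' == l.getD (i + 3) ' ')
          && (l.getD i ' ' == l.getD (i + 4) ' ')) = true)) :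
    ∀ k, k ≤ 2 → i + k < l.length - 4 → quintP l (i + k) = false := by
  intro k hk hlt
  have hb : (i : Int) ≤ (l.length : Int) - 3 - 2 := by omega
  simp only [hb, decide_true, Bool.true_and, Bool.and_eq_true, beq_iff_eq, not_and] at hfail
  simp only [Bool.and_eq_true, beq_iff_eq] at h12
  obtain ⟨t1, t2⟩ := h12
  rw [Bool.eq_false_iff]
  intro hq'
  simp only [quintP, Bool.and_eq_true, beq_iff_eq] at hq'
  obtain ⟨⟨⟨q1, q2⟩, q3⟩, q4⟩ := hq'
  interval_cases k
  · exact hfail q3 q4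
  · exact hfail (t1.trans q2) (t1.trans q3)
  · exact hfail (t2.trans q1) (t2.trans q2)

-- a triple at i that fails A's quint test lets A jump from i straight to i+3
lemma quintFold_skip3 (l : List Char) (d : PySem.Dict Char Bool) (i : Nat)
    (h12 : (l.getD i ' ' == l.getD (i + 1) ' ' && l.getD i ' ' == l.getD (i + 2) ' ') = true)
    (hfail : ¬ ((decide ((i : Int) ≤ (l.length : Int) - 3 - 2) && (l.getD i ' ' == l.getD (i + 3) ' ')
          && (l.getD i ' ' == l.getD (i + 4) ' ')) = true)) :
    quintFold l d i = quintFold l d (i + 3) := by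
  by_cases h0 : i < l.length - 4
  · rw [quintFold_skip_false l d i (no_quint_in_trip_skip l i h12 hfail 0 (by omega) (by simpa using h0))]
    by_cases h1 : i + 1 < l.length - 4
    · rw [quintFold_skip_false l d (i + 1) (no_quint_in_trip_skip l i h12 hfail 1 (by omega) h1)]
      by_cases h2 : i + 2 < l.length - 4
      · rw [show i + 1 + 1 = i + 2 by omega,
            quintFold_skip_false l d (i + 2) (no_quint_in_trip_skip l i h12 hfail 2 (by omega) h2)]
      · rw [quintFold_of_ge l d (i + 1 + 1) (by omega), quintFold_of_ge l d (i + 3) (by omega)]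
    · rw [quintFold_of_ge l d (i + 1) (by omega), quintFold_of_ge l d (i + 3) (by omega)]
  · rw [quintFold_of_ge l d i (by omega), quintFold_of_ge l d (i + 3) (by omega)]

-- triples are a prefix condition of quints
lemma tripP_of_quintP (l : List Char) (i : Nat) (ht : tripP l i = false) :
    quintP l i = false := by
  have ht' := ht
  simp only [tripP] at ht'
  simp only [quintP]
  rw [ht']
  simp

-- main invariant of A's loop
lemma loop_inv (l : List Char) (trip : String) (d : PySem.Dict Char Bool) (index : Nat) :
    find_trip_and_quints_loop l ((l.length : Int) - 3) ((l.length : Int) - 3 - 2) trip d index =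
      ((if trip == "" then
          (match firstTrip l index with
           | some i => String.ofList [l.getD i ' ']
           | none => "")
        else trip),
       (quintFold l d index).keys.map (fun c => String.ofList [c])) := by
  rw [find_trip_and_quints_loop]
  split
  · rename_i h
    rw [quintFold_of_ge l d index (by omega)]
    rw [firstTrip_step]
    have h2 : ¬ index < l.length - 2 := by omega
    simp only [h2, if_false]
    split <;> simp_all
  · rename_i h
    by_cases he : (trip == "") = true
    · simp only [he, if_true]
      split
      · rename_i htrip
        have hn2 : index < l.length - 2 := by omega
        have hmk : (String.ofList [l.getD index ' '] == "") = false := by simp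
        split
        · rename_i hq
          rw [loop_inv, hmk]
          simp only [Bool.and_eq_true, decide_eq_true_eq] at hq
          rw [← quintFold_quint l d index
                (quintP_of_conds l index htrip hq.1.2 hq.2) (by omega)]
          simp [firstTrip_hit l index hn2 (by simpa [tripP] using htrip)]
        · rename_i hq
          rw [loop_inv, hmk, ← quintFold_skip3 l d index htrip hq]
          simp [firstTrip_hit l index hn2 (by simpa [tripP] using htrip)]
      · rename_i htrip
        rw [loop_inv, he]
        have ht : tripP l index = false := by
          cases hx : tripP l index
          · rfl
          · exact absurd (by simpa [tripP] using hx) (by simpa using htrip)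
        rw [← firstTrip_skip1 l index ht,
            ← quintFold_skip_false l d index (tripP_of_quintP l index ht)]
        simp
    · have he' : (trip == "") = false := by simpa using he
      simp only [he']
      split
      · rename_i htrip
        split
        · rename_i hq
          rw [loop_inv]
          simp only [Bool.and_eq_true, decide_eq_true_eq] at hq
          rw [← quintFold_quint l d index
                (quintP_of_conds l index htrip hq.1.2 hq.2) (by omega)]
          simp [he']
        · rename_i hq
          rw [loop_inv, ← quintFold_skip3 l d index htrip hq]
          simp [he']
      · rename_i htrip
        rw [loop_inv]
        have ht : tripP l index = false := by
          cases hx : tripP l index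
          · rfl
          · exact absurd (by simpa [tripP] using hx) (by simpa using htrip)
        rw [← quintFold_skip_false l d index (tripP_of_quintP l index ht)]
        simp [he']
termination_by ((l.length : Int) - index).toNat
decreasing_by all_goals omega

-- dedup commutes with the injective map c ↦ String.ofList [c]
lemma dedup_map_mk (cs : List Char) :
    PySem.List.dedup (cs.map (fun c => String.ofList [c]))
      = (PySem.List.dedup cs).map (fun c => String.ofList [c]) := by
  have hinj : ∀ a b : Char, String.ofList [a] = String.ofList [b] → a = b := by
    intro a b h
    have := congrArg String.toList h
    simpa using this
  simp only [PySem.List.dedup_eq_ofList]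
  induction cs using List.reverseRecOn with
  | nil => rfl
  | append_singleton xs x ih =>
    simp only [List.map_append, List.map_cons, List.map_nil]
    rw [PySem.Set.ofList_append_singleton, PySem.Set.ofList_append_singleton, ih]
    unfold PySem.Set.add
    have hiff : (∃ a ∈ xs, String.ofList [a] = String.ofList [x]) ↔ x ∈ xs :=
      ⟨fun ⟨a, ha, he⟩ => hinj a x he ▸ ha, fun h => ⟨x, h, rfl⟩⟩
    by_cases hx : x ∈ xs <;> simp [hx, hiff]

-- the composed rewrite from A's key-set fold to B's dedup of 1-char strings
lemma final_quints (l : List Char) (F : List Nat) :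
    List.map (fun c => String.ofList [c])
        (List.foldl PySem.Set.add [] (List.map (fun j => l.getD j ' ') F))
      = PySem.List.dedup (List.map (fun i => String.ofList [l.getD i ' ']) F) := by
  rw [← PySem.Set.ofList_eq_foldl, ← PySem.List.dedup_eq_ofList, ← dedup_map_mk, List.map_map]
  rfl

-- ===== VERDICT (by name: the statement is the Claim_ definition above) =====
theorem find_trip_and_quints_spec : Claim_equal_find_trip_and_quints := by
  intro key _
  unfold Spec_find_trip_and_quints find_trip_and_quints find_trip_and_quints_alt
  rw [loop_inv]
  simp only [Prod.mk.injEq]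
  constructor
  · simp only [BEq.rfl, if_true]
    unfold firstTrip tripP
    rw [List.range_eq_range']
    simp
  · unfold quintFold quintP
    rw [PySem.Dict.keys_foldl_insert_key]
    simp only [PySem.Dict.keys_empty, PySem.Set.update]
    rw [final_quints, List.range_eq_range']
    simp
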